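-- pv_equiv track=rewrite | github.com/haoming-codes/time-to-rank | util.py | doInsertionMove
-- ===== SOURCE A (Python) =====
-- def doInsertionMove(start_rank):
--     sorted_list = sorted(start_rank)
--     if sorted_list == start_rank:
--         return None
--     to_move = None
--     for i in range(1, len(start_rank)):
--         if start_rank[i] >= start_rank[i-1]:
--             continue
--         to_move = start_rank[i]
--         to_move_pos = i
--         break
--     assert to_move != None
--     end_rank = sorted(start_rank[:to_move_pos+1]) + start_rank[to_move_pos+1:]
--     assert len(end_rank) == len(start_rank)
--     return end_rank, to_move
-- ===== SOURCE B (Python) =====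
-- def _scan(start_rank):
--     # return (value, index) of the first adjacent inversion, or None if nondecreasing
--     it = iter(start_rank)
--     prev = next(it)
--     i = 1
--     for y in it:
--         if y >= prev:
--             prev = y
--             i += 1
--         else:
--             return (y, i)
--     return None
--
--
-- def doInsertionMove(start_rank):
--     if not start_rank:
--         return None
--     found = _scan(start_rank)
--     if found is None:
--         return None
--     x, i = found
--     prefix = start_rank[:i]          # already nondecreasing
--     k = 0                            # insertion point: after all elements <= x
--     while k < len(prefix) and prefix[k] <= x:
--         k += 1
--     return prefix[:k] + [x] + prefix[k:] + start_rank[i+1:], x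
-- ===== Notes on version B (the rewrite author's own statement) =====
-- stated objective: faster
-- what changed: B replaces A's two full sorts (one to test sortedness, one over the prefix) by a single linear scan that finds the first adjacent inversion and a linear insertion of that one element into the already-sorted prefix.
import Mathlib
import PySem

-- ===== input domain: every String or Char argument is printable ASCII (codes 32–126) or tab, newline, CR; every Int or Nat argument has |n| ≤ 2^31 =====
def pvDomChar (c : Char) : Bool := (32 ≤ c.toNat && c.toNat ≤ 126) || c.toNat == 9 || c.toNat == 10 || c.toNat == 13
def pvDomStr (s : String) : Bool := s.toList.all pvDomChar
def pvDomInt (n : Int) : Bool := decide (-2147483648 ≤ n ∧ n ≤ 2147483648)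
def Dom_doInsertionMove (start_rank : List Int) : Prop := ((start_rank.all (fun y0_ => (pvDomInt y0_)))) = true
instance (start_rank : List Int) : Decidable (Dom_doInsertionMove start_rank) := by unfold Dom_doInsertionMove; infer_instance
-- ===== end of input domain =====

-- B replaces A's two full sorts by one linear scan for the first inversion plus a linear
-- insertion of the out-of-place element into the already-sorted prefix (objective: faster).


-- ===== PORT A =====
-- A's 'for i in range(1, len(start_rank))' loop: first i with a[i] < a[i-1], as (to_move, i).
-- Indices from pyRange 1 len are always in range, so pyGetD's default 0 is never read.
def pyAFindLoop (a : List Int) : List Int → Option (Int × Int)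
  | [] => none        -- loop falls through: to_move stays None (Python's assert would fire)
  | i :: rest =>
    if PySem.List.pyGetD a i 0 ≥ PySem.List.pyGetD a (i - 1) 0 then
      pyAFindLoop a rest
    else
      some (PySem.List.pyGetD a i 0, i)

def doInsertionMove (start_rank : List Int) : Option (List Int × Int) :=
  let sorted_list := PySem.List.sorted start_rank (fun x => x) false
  if sorted_list = start_rank then
    none
  else
    match pyAFindLoop start_rank (PySem.List.pyRange 1 (start_rank.length : Int) 1) with
    | some (to_move, to_move_pos) =>
        some (PySem.List.sorted (PySem.List.slice start_rank none (some (to_move_pos + 1))) (fun x => x) false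
                ++ PySem.List.slice start_rank (some (to_move_pos + 1)) none,
              to_move)
    | none => none      -- unreachable: 'assert to_move != None' (never fires on Int lists, proved below)

-- ===== PORT B =====
-- B's for-loop with prev: first adjacent inversion, as (value, index).
def pyBScan (prev : Int) (t : List Int) (i : Int) : Option (Int × Int) :=
  match t with
  | [] => none
  | y :: ys => if y ≥ prev then pyBScan y ys (i + 1) else some (y, i)

-- B's 'while k < len(prefix) and prefix[k] <= x' insertion: k is the length of the maximal
-- prefix of elements ≤ x, so prefix[:k] = takeWhile (· ≤ x) and prefix[k:] = dropWhile (exact).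
def pyBInsert (x : Int) (ys : List Int) : List Int :=
  ys.takeWhile (fun y => y ≤ x) ++ x :: ys.dropWhile (fun y => y ≤ x)

def doInsertionMove_alt (start_rank : List Int) : Option (List Int × Int) :=
  match start_rank with
  | [] => none
  | h :: t =>
    match pyBScan h t 1 with
    | none => none
    | some (x, i) =>
        some (pyBInsert x (PySem.List.slice start_rank none (some i))
                ++ PySem.List.slice start_rank (some (i + 1)) none,
              x)

-- ===== PRECONDITION & SPEC =====
def Spec_doInsertionMove (start_rank : List Int) (out : Option (List Int × Int)) : Prop := out = doInsertionMove_alt start_rank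
instance (start_rank : List Int) (out : Option (List Int × Int)) : Decidable (Spec_doInsertionMove start_rank out) := by unfold Spec_doInsertionMove; infer_instance

-- ===== CLAIM (what is proved, stated in full; the proofs are below) =====
def Claim_equal_doInsertionMove : Prop := ∀ (start_rank : List Int), Dom_doInsertionMove start_rank → Spec_doInsertionMove start_rank (doInsertionMove start_rank)

-- ===== LEMMAS AND PROOFS =====

-- B's scan returns none exactly on a nondecreasing chain.
theorem pyBScan_eq_none (t : List Int) : ∀ (prev i : Int),
    pyBScan prev t i = none ↔ List.IsChain (· ≤ ·) (prev :: t) := by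
  induction t with
  | nil => intro prev i; simp [pyBScan]
  | cons y ys ih =>
    intro prev i
    rw [List.isChain_cons_cons]
    simp only [pyBScan]
    by_cases h : y ≥ prev
    · simp [h, ih y (i + 1)]
    · simp [h]

-- Decomposition produced by a successful scan.
theorem pyBScan_eq_some (t : List Int) : ∀ (prev i x j : Int),
    pyBScan prev t i = some (x, j) →
    ∃ q r, t = q ++ x :: r ∧ j = i + q.length ∧
      List.IsChain (· ≤ ·) (prev :: q) ∧ x < (prev :: q).getLast (by simp) := by
  induction t with
  | nil => intro prev i x j h; simp [pyBScan] at h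
  | cons y ys ih =>
    intro prev i x j h
    simp only [pyBScan] at h
    by_cases hy : y ≥ prev
    · rw [if_pos hy] at h
      obtain ⟨q, r, ht, hj, hc, hlt⟩ := ih y (i + 1) x j h
      refine ⟨y :: q, r, by simp [ht], by simp [hj]; omega, ?_, ?_⟩
      · exact List.isChain_cons_cons.mpr ⟨hy, hc⟩
      · simpa [List.getLast_cons] using hlt
    · rw [if_neg hy] at h
      obtain ⟨hx, hj⟩ : x = y ∧ j = i := by
        have := Option.some.inj h; exact ⟨(Prod.mk.inj this).1.symm, (Prod.mk.inj this).2.symm⟩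
      refine ⟨[], ys, by simp [hx], by simp [hj], by simp, by simp [hx]; omega⟩

-- Inserting into a nondecreasing list is exactly stable-sort insertion at the end.
theorem sorted_append_singleton (p : List Int) (x : Int)
    (hp : p.Pairwise (· ≤ ·)) :
    PySem.List.sorted (p ++ [x]) (fun v => v) false = pyBInsert x p := by
  have hsplit : p.takeWhile (fun y => y ≤ x) ++ p.dropWhile (fun y => y ≤ x) = p :=
    List.takeWhile_append_dropWhile
  have hperm : (pyBInsert x p).Perm (p ++ [x]) := by
    unfold pyBInsert
    calc (p.takeWhile (fun y => y ≤ x) ++ x :: p.dropWhile (fun y => y ≤ x)).Perm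
          (p.takeWhile (fun y => y ≤ x) ++ (p.dropWhile (fun y => y ≤ x) ++ [x])) :=
            List.Perm.append_left _ (List.perm_append_singleton _ _).symm
      _ = p ++ [x] := by rw [← List.append_assoc, hsplit]
  have hp' : (p.takeWhile (fun y => y ≤ x) ++ p.dropWhile (fun y => y ≤ x)).Pairwise (· ≤ ·) := by
    rw [hsplit]; exact hp
  rw [List.pairwise_append] at hp'
  obtain ⟨htw, hdw, hcross⟩ := hp'
  have htw_le : ∀ a ∈ p.takeWhile (fun y => y ≤ x), a ≤ x := by
    intro a ha
    simpa using List.mem_takeWhile_imp ha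
  have hdw_ge : ∀ b ∈ p.dropWhile (fun y => y ≤ x), x ≤ b := by
    intro b hb
    cases hdw_eq : p.dropWhile (fun y => y ≤ x) with
    | nil => simp [hdw_eq] at hb
    | cons d ds =>
      have hd : ¬ (d ≤ x) := by
        have := List.head_dropWhile_not (fun y => decide (y ≤ x)) (l := p)
        simp only [hdw_eq] at this
        simpa using this (by simp)
      rw [hdw_eq] at hb hdw
      rcases List.mem_cons.mp hb with rfl | hbs
      · omega
      · have : d ≤ b := (List.pairwise_cons.mp hdw).1 b hbs
        omega
  have hpw : (pyBInsert x p).Pairwise (· ≤ ·) := by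
    unfold pyBInsert
    rw [List.pairwise_append]
    refine ⟨htw, List.pairwise_cons.mpr ⟨hdw_ge, hdw⟩, ?_⟩
    intro a ha b hb
    rcases List.mem_cons.mp hb with rfl | hb'
    · exact htw_le a ha
    · exact hcross a ha b hb'
  exact PySem.List.sorted_id_eq_of_perm_of_pairwise _ _ hperm hpw

-- A's index loop computes the same answer as B's prev-carrying scan.
theorem loops_agree (a : List Int) : ∀ (m k : Nat), m = a.length - (k + 1) → ∀ (hk : k < a.length),
    pyAFindLoop a (PySem.List.pyRange ((k : Int) + 1) (a.length : Int) 1) =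
      pyBScan (a[k]'hk) (a.drop (k + 1)) ((k : Int) + 1) := by
  intro m
  induction m with
  | zero =>
    intro k hm hk
    rw [show PySem.List.pyRange ((k : Int) + 1) (a.length : Int) 1 = [] from
          PySem.List.pyRange_one_eq_nil (by omega),
        List.drop_eq_nil_of_le (by omega)]
    simp [pyAFindLoop, pyBScan]
  | succ m ih =>
    intro k hm hk
    have hk1 : k + 1 < a.length := by omega
    rw [show PySem.List.pyRange ((k : Int) + 1) (a.length : Int) 1 =
          ((k : Int) + 1) :: PySem.List.pyRange ((k : Int) + 1 + 1) (a.length : Int) 1 from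
          PySem.List.pyRange_one_cons (by omega),
        List.drop_eq_getElem_cons hk1]
    simp only [pyAFindLoop, pyBScan]
    have ht1 : ((k : Int) + 1).toNat = k + 1 := by omega
    have ht0 : ((k : Int) + 1 - 1).toNat = k := by omega
    have hget1 : PySem.List.pyGetD a ((k : Int) + 1) 0 = a[k + 1] := by
      rw [PySem.List.pyGetD_eq_getElem a 0 (by omega) (by omega)]
      simp only [ht1]
    have hget0 : PySem.List.pyGetD a ((k : Int) + 1 - 1) 0 = a[k] := by
      rw [PySem.List.pyGetD_eq_getElem a 0 (by omega) (by omega)]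
      simp only [ht0]
    rw [hget1, hget0]
    by_cases hc : a[k + 1] ≥ a[k]
    · rw [if_pos hc, if_pos hc]
      have := ih (k + 1) (by omega) hk1
      rw [show ((k : Int) + 1 + 1) = (((k + 1 : Nat) : Int) + 1) by push_cast; ring]
      exact this
    · rw [if_neg hc, if_neg hc]

-- sorted(a) == a exactly when a is nondecreasing.
theorem sorted_eq_self_iff (a : List Int) :
    PySem.List.sorted a (fun x => x) false = a ↔ a.Pairwise (· ≤ ·) := by
  constructor
  · intro h
    have := PySem.List.sorted_pairwise (xs := a) (key := fun x => x)
    rw [h] at this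
    exact this
  · intro h
    exact PySem.List.sorted_eq_self_of_pairwise a (fun x => x) h

-- ===== VERDICT (by name: the statement is the Claim_ definition above) =====
theorem doInsertionMove_spec : Claim_equal_doInsertionMove := by
  intro a _
  unfold Spec_doInsertionMove
  cases a with
  | nil => rfl
  | cons h t =>
    simp only [doInsertionMove, doInsertionMove_alt]
    have hloops := loops_agree (h :: t) ((h :: t).length - 1) 0 (by simp) (by simp)
    simp only [List.getElem_cons_zero, List.drop_succ_cons, List.drop_zero, Nat.cast_zero,
      zero_add] at hloops
    cases hscan : pyBScan h t 1 with
    | none =>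
      have hchain : List.IsChain (· ≤ ·) (h :: t) := (pyBScan_eq_none t h 1).mp hscan
      have hpw : (h :: t).Pairwise (· ≤ ·) := List.isChain_iff_pairwise.mp hchain
      rw [if_pos ((sorted_eq_self_iff _).mpr hpw)]
    | some xi =>
      obtain ⟨x, j⟩ := xi
      obtain ⟨q, r, ht, hj, hc, hlt⟩ := pyBScan_eq_some t h 1 x j hscan
      have hpw_p : (h :: q).Pairwise (· ≤ ·) := List.isChain_iff_pairwise.mp hc
      have hnot : ¬ (h :: t).Pairwise (· ≤ ·) := by
        intro hpw
        rw [ht] at hpw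
        have hcr : ∀ u ∈ h :: q, ∀ v ∈ x :: r, u ≤ v :=
          ((List.pairwise_append (l₁ := h :: q) (l₂ := x :: r)).mp (by simpa using hpw)).2.2
        have hmem : (h :: q).getLast (by simp) ∈ h :: q := List.getLast_mem _
        have := hcr _ hmem x (by simp)
        omega
      rw [if_neg (fun hs => hnot ((sorted_eq_self_iff _).mp hs))]
      rw [hloops, hscan]
      have hjval : j = ((q.length + 1 : Nat) : Int) := by push_cast; omega
      have hlen_a : h :: t = (h :: q) ++ x :: r := by simp [ht]
      have hslice1 : PySem.List.slice (h :: t) none (some j) = h :: q := by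
        rw [hjval, PySem.List.slice_to_natCast, hlen_a]
        exact List.take_left' (by simp)
      have hslice2 : PySem.List.slice (h :: t) none (some (j + 1)) = (h :: q) ++ [x] := by
        rw [hjval, show ((q.length + 1 : Nat) : Int) + 1 = ((q.length + 2 : Nat) : Int) by
              push_cast; ring,
          PySem.List.slice_to_natCast, hlen_a,
          show (h :: q) ++ x :: r = ((h :: q) ++ [x]) ++ r by simp]
        exact List.take_left' (by simp)
      have hslice3 : PySem.List.slice (h :: t) (some (j + 1)) none = r := by
        rw [hjval, show ((q.length + 1 : Nat) : Int) + 1 = ((q.length + 2 : Nat) : Int) by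
              push_cast; ring,
          PySem.List.slice_from_natCast, hlen_a,
          show (h :: q) ++ x :: r = ((h :: q) ++ [x]) ++ r by simp]
        exact List.drop_left' (by simp)
      simp only [hslice1, hslice2, hslice3, sorted_append_singleton _ _ hpw_p]
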